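-- pv_equiv track=rewrite | github.com/paulecode/se01 | ex2.py | getTopLiquidLength
-- ===== SOURCE A (Python) =====
-- def getTopLiquid(beaker):
--     beaker = beaker.copy()
--     while beaker:
--         topLiquid = beaker.pop()
--         if topLiquid == 0:
--             continue
--         else:
--             return topLiquid
--
--     return "Its empty"
--
-- def getTopLiquidLength(beaker):
--     beaker = beaker.copy()
--     length = 0
--     color = getTopLiquid(beaker)
--     while beaker:
--         topLiquid = beaker.pop()
--         if topLiquid == 0:
--             continue
--         if topLiquid == color:
--             length += 1
--         else:
--             break
--     return length
-- ===== SOURCE B (Python) =====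
-- def getTopLiquidLength(beaker):
--     color = None
--     length = 0
--     for x in reversed(beaker):
--         if x == 0:
--             continue
--         if color is None:
--             color = x
--             length = 1
--         elif x == color:
--             length += 1
--         else:
--             break
--     return length
-- ===== Notes on version B (the rewrite author's own statement) =====
-- stated objective: simpler
-- what changed: Single pass over reversed(beaker) discovering the top color on the fly, instead of A's two passes (a helper that copies and pops to find the color, then a second pop loop to count).
import Mathlib
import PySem

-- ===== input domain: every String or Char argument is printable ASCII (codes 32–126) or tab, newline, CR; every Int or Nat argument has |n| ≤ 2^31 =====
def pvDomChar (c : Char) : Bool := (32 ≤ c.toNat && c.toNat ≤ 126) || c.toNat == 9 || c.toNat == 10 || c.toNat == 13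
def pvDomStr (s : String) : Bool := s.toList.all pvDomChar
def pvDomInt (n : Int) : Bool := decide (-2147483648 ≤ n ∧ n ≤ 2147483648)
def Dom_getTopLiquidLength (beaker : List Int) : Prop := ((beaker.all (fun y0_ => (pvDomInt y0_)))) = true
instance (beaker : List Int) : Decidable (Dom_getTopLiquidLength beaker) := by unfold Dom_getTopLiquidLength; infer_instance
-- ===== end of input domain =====

-- ===== PORT A =====
-- B replaces A's two pop-loops (helper finds the color, second loop counts) by one pass over reversed(beaker); return value only.
-- helper getTopLiquid: pops from the end skipping zeros; "Its empty" is ported as none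
def pvFindTop : List Int → Option Int
  | [] => none
  | x :: xs => if x = 0 then pvFindTop xs else some x

-- the counting while-loop of A, over the reversed list (pop() = head of reverse)
def pvLenLoop (color : Option Int) : List Int → Int → Int
  | [], len => len
  | x :: xs, len =>
      if x = 0 then pvLenLoop color xs len
      else if some x = color then pvLenLoop color xs (len + 1)
      else len

def getTopLiquidLength (beaker : List Int) : Int :=
  pvLenLoop (pvFindTop beaker.reverse) beaker.reverse 0

-- ===== PORT B =====
def pvAltLoop : List Int → Option Int → Int → Int
  | [], _, len => len
  | x :: xs, none, len => if x = 0 then pvAltLoop xs none len else pvAltLoop xs (some x) 1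
  | x :: xs, some c, len =>
      if x = 0 then pvAltLoop xs (some c) len
      else if x = c then pvAltLoop xs (some c) (len + 1)
      else len

def getTopLiquidLength_alt (beaker : List Int) : Int :=
  pvAltLoop beaker.reverse none 0

-- ===== PRECONDITION & SPEC =====
def Spec_getTopLiquidLength (beaker : List Int) (out : Int) : Prop := out = getTopLiquidLength_alt beaker
instance (beaker : List Int) (out : Int) : Decidable (Spec_getTopLiquidLength beaker out) := by unfold Spec_getTopLiquidLength; infer_instance

-- ===== CLAIM (what is proved, stated in full; the proofs are below) =====
def Claim_equal_getTopLiquidLength : Prop := ∀ (beaker : List Int), Dom_getTopLiquidLength beaker → Spec_getTopLiquidLength beaker (getTopLiquidLength beaker)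

-- ===== LEMMAS AND PROOFS =====
theorem altLoop_some_eq (xs : List Int) (c : Int) (len : Int) :
    pvAltLoop xs (some c) len = pvLenLoop (some c) xs len := by
  induction xs generalizing len with
  | nil => rfl
  | cons x xs ih =>
      simp only [pvAltLoop, pvLenLoop]
      by_cases h0 : x = 0
      · simp [h0, ih]
      · simp only [if_neg h0]
        by_cases hc : x = c
        · simp [hc, ih]
        · have : ¬ some x = some c := by simp [hc]
          simp [hc, this]

theorem loop_eq (xs : List Int) :
    pvAltLoop xs none 0 = pvLenLoop (pvFindTop xs) xs 0 := by
  induction xs with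
  | nil => rfl
  | cons x xs ih =>
      simp only [pvAltLoop, pvLenLoop, pvFindTop]
      by_cases h0 : x = 0
      · simp [h0, ih]
      · simp [h0, altLoop_some_eq]

-- ===== VERDICT (by name: the statement is the Claim_ definition above) =====
theorem getTopLiquidLength_spec : Claim_equal_getTopLiquidLength := by
  intro beaker _
  unfold Spec_getTopLiquidLength getTopLiquidLength getTopLiquidLength_alt
  exact (loop_eq beaker.reverse).symm
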